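-- pv_equiv track=rewrite | github.com/dspruell/scripts | utils/decode-pseudo-darkleech.py | deobfuscate
-- ===== SOURCE A (Python) =====
-- def deobfuscate(payload, key):
--     browser_index = 2
--     browser_index2 = browser_index - 1
--     output = ""
--     u = 0
--     i0 = 0
--     i1 = 0
--     i2 = 0
--     while True:
--         if i0 >= len(payload):
--             break
--         c = payload[i0]
--         o = ord(c)
--         if o >= 97 and o <= 122:
--             if i1 % browser_index:
--                 output += chr(((u + o - 97) ^ ord(key[i2 % len(key)])) % 255)
--                 i2 += 1
--             else:
--                 u = (o - 97) * 26
--             i1 += 1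
--         i0 += browser_index2
--     return output
-- ===== SOURCE B (Python) =====
-- def deobfuscate(payload, key):
--     # Collect the ordinals of the lowercase letters once, then decode them in
--     # consecutive pairs: first of each pair is the high base-26 digit, second the low.
--     ords = [ord(c) for c in payload if 'a' <= c <= 'z']
--     out = []
--     i = 0
--     k = 0
--     while i + 1 < len(ords):
--         a = ords[i]
--         b = ords[i + 1]
--         out.append(chr((((a - 97) * 26 + (b - 97)) ^ ord(key[k % len(key)])) % 255))
--         i += 2
--         k += 1
--     return "".join(out)
-- ===== Notes on version B (the rewrite author's own statement) =====
-- stated objective: simpler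
-- what changed: B replaces A's one-character state machine (parity counter i1 and carried high digit u) by a two-phase decomposition: one comprehension collects lowercase ordinals, then a single pair loop decodes each (high, low) pair directly.
import Mathlib
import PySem

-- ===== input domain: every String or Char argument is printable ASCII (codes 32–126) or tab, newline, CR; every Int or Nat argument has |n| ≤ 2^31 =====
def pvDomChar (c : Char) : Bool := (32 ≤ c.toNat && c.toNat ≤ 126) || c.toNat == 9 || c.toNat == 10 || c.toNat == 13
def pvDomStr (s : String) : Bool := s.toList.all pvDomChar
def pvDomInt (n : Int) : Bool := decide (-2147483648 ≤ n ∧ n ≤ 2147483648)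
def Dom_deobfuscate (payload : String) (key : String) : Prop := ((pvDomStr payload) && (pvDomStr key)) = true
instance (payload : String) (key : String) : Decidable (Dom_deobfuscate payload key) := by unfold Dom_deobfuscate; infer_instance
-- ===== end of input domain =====

-- B restructures A's one-character state machine (parity counter + carried high digit)
-- into a filter pass followed by a pair-decoding loop; same cost, simpler (objective: simpler).
-- Both Pythons raise ZeroDivisionError on an empty key once a pair must be emitted; Pre_ excludes that.

-- ===== PORT A =====
-- key lookup key[i2 % len(key)] as an ordinal; Pre_ guarantees key ≠ [] whenever this runs,
-- so the .getD default is never observed on admitted inputs.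
def keyOrdA (key : List Char) (i : Nat) : Nat := ((key[i % key.length]?).getD 'a').toNat

-- the while-loop of A: scans payload left-to-right (browser_index2 = 1), state u, i1, i2, output
def loopA (key : List Char) : List Char → Nat → Nat → Nat → List Char → List Char
  | [], _, _, _, out => out
  | c :: rest, u, i1, i2, out =>
    let o := c.toNat
    if 97 ≤ o ∧ o ≤ 122 then
      if i1 % 2 ≠ 0 then
        loopA key rest u (i1 + 1) (i2 + 1)
          (out ++ [Char.ofNat (((u + o - 97) ^^^ keyOrdA key i2) % 255)])
      else
        loopA key rest ((o - 97) * 26) (i1 + 1) i2 out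
    else
      loopA key rest u i1 i2 out

def deobfuscate (payload : String) (key : String) : String :=
  String.ofList (loopA key.toList payload.toList 0 0 0 [])

-- ===== PORT B =====
def keyOrdB (key : List Char) (k : Nat) : Nat := ((key[k % key.length]?).getD 'a').toNat

-- Source B's pair loop: ords[i], ords[i+1] consumed with i += 2 and key counter k += 1
def pairsB (key : List Char) : Nat → List Nat → List Char
  | k, a :: b :: rest =>
      Char.ofNat ((((a - 97) * 26 + (b - 97)) ^^^ keyOrdB key k) % 255) :: pairsB key (k + 1) rest
  | _, _ => []

def lettersOf (payload : List Char) : List Nat :=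
  (payload.filter (fun c => decide (97 ≤ c.toNat ∧ c.toNat ≤ 122))).map Char.toNat

def deobfuscate_alt (payload : String) (key : String) : String :=
  String.ofList (pairsB key.toList 0 (lettersOf payload.toList))

-- ===== PRECONDITION & SPEC =====
-- Pre_ excludes exactly the inputs where Python A raises ZeroDivisionError:
-- an empty key together with at least two lowercase letters in the payload.
def Pre_deobfuscate (payload : String) (key : String) : Prop :=
  key.toList ≠ [] ∨ (lettersOf payload.toList).length < 2
instance (payload : String) (key : String) : Decidable (Pre_deobfuscate payload key) := by
  unfold Pre_deobfuscate; infer_instance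

def pvWitness_deobfuscate : String × String := ("abcd", "k")

def Spec_deobfuscate (payload : String) (key : String) (out : String) : Prop := out = deobfuscate_alt payload key
instance (payload : String) (key : String) (out : String) : Decidable (Spec_deobfuscate payload key out) := by unfold Spec_deobfuscate; infer_instance

-- ===== CLAIM (what is proved, stated in full; the proofs are below) =====
def Claim_equal_deobfuscate : Prop := ∀ (payload : String) (key : String), Dom_deobfuscate payload key → Pre_deobfuscate payload key → Spec_deobfuscate payload key (deobfuscate payload key)

-- ===== LEMMAS AND PROOFS =====

lemma lettersOf_ge (payload : List Char) : ∀ x ∈ lettersOf payload, 97 ≤ x := by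
  intro x hx
  simp only [lettersOf, List.mem_map, List.mem_filter, decide_eq_true_eq] at hx
  obtain ⟨c, ⟨_, h1, _⟩, rfl⟩ := hx
  exact h1

lemma keyOrd_eq (key : List Char) (i : Nat) : keyOrdA key i = keyOrdB key i := rfl

-- the core invariant: A's scan, started in even parity, produces the pair decoding of the
-- remaining letters; started in odd parity with pending high digit u, it first emits with u.
lemma loopA_char (key : List Char) :
    ∀ cs : List Char, ∀ u i2 out,
      (∀ i1, i1 % 2 = 0 → loopA key cs u i1 i2 out = out ++ pairsB key i2 (lettersOf cs)) ∧
      (∀ i1, i1 % 2 = 1 → loopA key cs u i1 i2 out =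
        match lettersOf cs with
        | [] => out
        | b :: rest =>
            (out ++ [Char.ofNat (((u + b - 97) ^^^ keyOrdA key i2) % 255)]) ++
              pairsB key (i2 + 1) rest) := by
  intro cs
  induction cs with
  | nil =>
    intro u i2 out
    constructor <;> intro i1 h <;> simp [loopA, lettersOf, pairsB]
  | cons c rest ih =>
    intro u i2 out
    by_cases hc : 97 ≤ c.toNat ∧ c.toNat ≤ 122
    · have hl : lettersOf (c :: rest) = c.toNat :: lettersOf rest := by
        simp [lettersOf, hc]
      constructor
      · intro i1 h
        have hodd : ¬ (i1 % 2 ≠ 0) := by omega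
        simp only [loopA, if_pos hc, if_neg hodd]
        rw [(ih ((c.toNat - 97) * 26) i2 out).2 (i1 + 1) (by omega), hl]
        cases hrest : lettersOf rest with
        | nil => simp [pairsB]
        | cons b rs =>
          have hb : 97 ≤ b := lettersOf_ge rest b (by rw [hrest]; exact List.mem_cons_self ..)
          have he : (c.toNat - 97) * 26 + b - 97 = (c.toNat - 97) * 26 + (b - 97) := by omega
          simp [pairsB, he, keyOrd_eq]
      · intro i1 h
        have hodd : i1 % 2 ≠ 0 := by omega
        simp only [loopA, if_pos hc, if_pos hodd]
        rw [(ih u (i2 + 1) (out ++ [Char.ofNat (((u + c.toNat - 97) ^^^ keyOrdA key i2) % 255)])).1 (i1 + 1) (by omega), hl]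
    · have hl : lettersOf (c :: rest) = lettersOf rest := by
        simp [lettersOf, hc]
      constructor
      · intro i1 h
        simp only [loopA, if_neg hc]
        rw [(ih u i2 out).1 i1 h, hl]
      · intro i1 h
        simp only [loopA, if_neg hc]
        rw [(ih u i2 out).2 i1 h, hl]

-- ===== VERDICT (by name: the statement is the Claim_ definition above) =====
theorem deobfuscate_spec : Claim_equal_deobfuscate := by
  intro payload key _ _
  unfold Spec_deobfuscate deobfuscate deobfuscate_alt
  rw [(loopA_char key.toList payload.toList 0 0 []).1 0 rfl]
  rfl
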